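-- pv_equiv track=rewrite | github.com/Alaashoky/lolohop | core/metrics.py | _normalise_path
-- ===== SOURCE A (Python) =====
-- def _normalise_path(path: str) -> str:
--     """Replace numeric path segments with {id} to limit label cardinality."""
--     parts = path.split("/")
--     normalised = []
--     for p in parts:
--         if p.isdigit() or (len(p) == 36 and p.count("-") == 4):  # UUID
--             normalised.append("{id}")
--         else:
--             normalised.append(p)
--     return "/".join(normalised)
-- ===== SOURCE B (Python) =====
-- def _normalise_path(path: str) -> str:
--     """Replace numeric/UUID path segments with {id} via a single character scan."""
--     out = []
--     i = 0
--     n = len(path)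
--     while i < n:
--         if path[i] == "/":
--             out.append("/")
--             i += 1
--         else:
--             j = i
--             while j < n and path[j] != "/":
--                 j += 1
--             seg = path[i:j]
--             if seg.isdigit() or (len(seg) == 36 and seg.count("-") == 4):
--                 out.append("{id}")
--             else:
--                 out.append(seg)
--             i = j
--     return "".join(out)
-- ===== Notes on version B (the rewrite author's own statement) =====
-- stated objective: alternative
-- what changed: A splits the path into a segment list, maps each segment and rejoins; B never builds that list: a single left-to-right character scan copies slash separators and rewrites each maximal non-slash run in place.
import Mathlib
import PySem

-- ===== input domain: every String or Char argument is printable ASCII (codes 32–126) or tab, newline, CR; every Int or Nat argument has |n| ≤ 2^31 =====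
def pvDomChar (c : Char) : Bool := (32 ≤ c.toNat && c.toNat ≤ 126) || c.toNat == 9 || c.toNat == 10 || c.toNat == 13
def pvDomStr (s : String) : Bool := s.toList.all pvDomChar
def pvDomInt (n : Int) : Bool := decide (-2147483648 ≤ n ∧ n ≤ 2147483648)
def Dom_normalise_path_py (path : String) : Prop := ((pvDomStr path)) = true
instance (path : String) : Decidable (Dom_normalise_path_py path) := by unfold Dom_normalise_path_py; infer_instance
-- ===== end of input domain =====

-- B replaces A's split/map/join over a segment list by a single left-to-right character
-- scan that copies '/' separators and rewrites each maximal non-slash run in place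
-- (objective: alternative decomposition, same cost).

-- ===== PORT A =====
-- A: split on "/", loop appending "{id}" or the segment, join with "/".
def normalise_path_py (path : String) : String :=
  -- "/" is a nonempty separator, so Python's split never raises; split? is always `some`
  let parts := (PySem.Str.split? path "/").getD []
  let normalised := parts.foldl (fun acc p =>
    if PySem.Str.strIsdigit p || (PySem.Str.len p == 36 && PySem.Str.count p "-" == 4)
    then acc ++ ["{id}"] else acc ++ [p]) []
  PySem.Str.join "/" normalised

-- ===== PORT B =====
-- Source B has no PySem counterpart for its while-loop scan, so it is ported by hand,
-- step for step: `pvScan` is the outer while loop (one call per iteration group),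
-- takeWhile/dropWhile are the inner `while j < n and path[j] != '/'` run search.
def pvRepl (seg : List Char) : List Char :=
  if PySem.Chars.strIsdigit seg || (PySem.Chars.len seg == 36 && PySem.Chars.count seg ['-'] == 4)
  then "{id}".toList else seg

def pvScan : List Char → List Char
  | [] => []
  | c :: rest =>
    if c = '/' then '/' :: pvScan rest
    else pvRepl (c :: rest.takeWhile (· ≠ '/')) ++ pvScan (rest.dropWhile (· ≠ '/'))
  termination_by cs => cs.length
  decreasing_by
  · simp
  · simpa using Nat.lt_succ_of_le (List.length_dropWhile_le _ _)

def normalise_path_py_alt (path : String) : String :=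
  String.ofList (pvScan path.toList)

-- ===== PRECONDITION & SPEC =====
def Spec_normalise_path_py (path : String) (out : String) : Prop := out = normalise_path_py_alt path
instance (path : String) (out : String) : Decidable (Spec_normalise_path_py path out) := by unfold Spec_normalise_path_py; infer_instance

-- ===== CLAIM (what is proved, stated in full; the proofs are below) =====
def Claim_equal_normalise_path_py : Prop := ∀ (path : String), Dom_normalise_path_py path → Spec_normalise_path_py path (normalise_path_py path)

-- ===== LEMMAS AND PROOFS =====

-- A's split, re-expressed as the obvious structural recursion on the char list.
def pvSplit : List Char → List (List Char)
  | [] => [[]]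
  | c :: rest =>
    if c = '/' then [] :: pvSplit rest
    else match pvSplit rest with
      | [] => [[c]]
      | h :: t => (c :: h) :: t

def pvPrepend (x : List Char) : List (List Char) → List (List Char)
  | [] => [x]
  | h :: t => (x ++ h) :: t

theorem pvSplit_ne_nil (cs : List Char) : pvSplit cs ≠ [] := by
  induction cs with
  | nil => simp [pvSplit]
  | cons c rest ih =>
    simp only [pvSplit]
    split
    · simp
    · cases h : pvSplit rest <;> simp

theorem pvGo_eq (fuel : Nat) (l cur : List Char) (acc : List (List Char))
    (h : l.length < fuel) :
    PySem.Chars.splitOn.go ['/'] fuel l cur acc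
      = acc.reverse ++ pvPrepend cur.reverse (pvSplit l) := by
  induction fuel generalizing l cur acc with
  | zero => omega
  | succ fuel ih =>
    cases l with
    | nil =>
      simp [PySem.Chars.splitOn.go, pvSplit, pvPrepend]
    | cons c rest =>
      by_cases hc : c = '/'
      · subst hc
        have : (['/'].isPrefixOf ('/' :: rest)) = true := by simp [List.isPrefixOf]
        rw [PySem.Chars.splitOn.go]
        simp only [this, if_pos]
        rw [show List.drop (['/'].length) ('/' :: rest) = rest from rfl]
        rw [ih rest [] (cur.reverse :: acc) (by simpa using Nat.lt_of_succ_lt_succ h)]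
        simp only [pvSplit, pvPrepend]
        cases hs : pvSplit rest with
        | nil => exact absurd hs (pvSplit_ne_nil rest)
        | cons a b => simp
      · have : (['/'].isPrefixOf (c :: rest)) = false := by
          simp [List.isPrefixOf]; exact fun hx => absurd hx.symm hc
        rw [PySem.Chars.splitOn.go]
        simp only [this]
        rw [if_neg (by simp_all)]
        rw [ih rest (c :: cur) acc (by simpa using Nat.lt_of_succ_lt_succ h)]
        simp only [pvSplit, if_neg hc]
        cases hs : pvSplit rest with
        | nil => exact absurd hs (pvSplit_ne_nil rest)
        | cons a b => simp [pvPrepend]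

theorem pvSplitOn_slash (cs : List Char) :
    PySem.Chars.splitOn cs ['/'] = pvSplit cs := by
  have := pvGo_eq (cs.length + 1) cs [] [] (Nat.lt_succ_self _)
  rw [PySem.Chars.splitOn, this]
  cases hs : pvSplit cs with
  | nil => exact absurd hs (pvSplit_ne_nil cs)
  | cons a b => simp [pvPrepend]

def pvSplitTail : List Char → List (List Char)
  | [] => []
  | _ :: r => pvSplit r

theorem pvSplit_run (cs : List Char) :
    pvSplit cs = cs.takeWhile (· ≠ '/') :: pvSplitTail (cs.dropWhile (· ≠ '/')) := by
  induction cs with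
  | nil => simp [pvSplit, pvSplitTail]
  | cons c rest ih =>
    by_cases hc : c = '/'
    · subst hc
      simp [pvSplit, List.takeWhile, List.dropWhile, pvSplitTail]
    · simp only [pvSplit, if_neg hc, List.takeWhile, List.dropWhile]
      have hb : (c ≠ '/') = True := by simp [hc]
      simp only [ih]
      simp [hc]

theorem pvRepl_nil : pvRepl [] = [] := by decide

theorem pvDropWhile_head (p : Char → Bool) :
    ∀ (l : List Char) (x : Char) (r : List Char), l.dropWhile p = x :: r → p x = false
  | a :: t, x, r, h => by
    by_cases ha : p a
    · exact pvDropWhile_head p t x r (by simpa [List.dropWhile, ha] using h)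
    · have : a :: t = x :: r := by simpa [List.dropWhile, ha] using h
      cases this; simpa using ha

theorem pvScan_eq_join (cs : List Char) :
    pvScan cs = PySem.Chars.join ['/'] ((pvSplit cs).map pvRepl) := by
  induction hn : cs.length using Nat.strong_induction_on generalizing cs with
  | _ n ih =>
  cases cs with
  | nil => simp [pvScan, pvSplit, PySem.Chars.join_singleton, pvRepl_nil]
  | cons c rest =>
    subst hn
    by_cases hc : c = '/'
    · subst hc
      rw [pvScan, if_pos rfl]
      rw [ih rest.length (by simp) rest rfl]
      show _ = PySem.Chars.join ['/'] ((pvSplit ('/' :: rest)).map pvRepl)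
      rw [show pvSplit ('/' :: rest) = [] :: pvSplit rest from by simp [pvSplit]]
      cases hs : pvSplit rest with
      | nil => exact absurd hs (pvSplit_ne_nil rest)
      | cons a b =>
        simp [PySem.Chars.join_cons_cons, pvRepl_nil]
    · rw [pvScan, if_neg hc]
      show _ = PySem.Chars.join ['/'] ((pvSplit (c :: rest)).map pvRepl)
      rw [pvSplit_run (c :: rest)]
      have htake : (c :: rest).takeWhile (· ≠ '/') = c :: rest.takeWhile (· ≠ '/') := by
        simp [List.takeWhile, hc]
      have hdrop : (c :: rest).dropWhile (· ≠ '/') = rest.dropWhile (· ≠ '/') := by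
        simp [List.dropWhile, hc]
      rw [htake, hdrop]
      cases hd : rest.dropWhile (· ≠ '/') with
      | nil =>
        simp [pvSplitTail, pvScan, PySem.Chars.join_singleton]
      | cons x r =>
        have hx : x = '/' := by
          have := pvDropWhile_head (fun ch => ch ≠ '/') rest x r hd
          simpa using this
        subst hx
        simp only [pvSplitTail, List.map]
        rw [pvScan, if_pos rfl]
        have hlen : r.length < (c :: rest).length := by
          have h1 : (rest.dropWhile (· ≠ '/')).length ≤ rest.length := List.length_dropWhile_le _ _
          rw [hd] at h1
          simp at h1 ⊢
          omega
        rw [ih r.length (by simpa using hlen) r rfl]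
        cases hs : pvSplit r with
        | nil => exact absurd hs (pvSplit_ne_nil r)
        | cons a b =>
          simp [PySem.Chars.join_cons_cons]

-- per-segment agreement of the two predicates, through the Str↔Chars bridges
theorem pvSeg_eq (p : List Char) :
    ((if PySem.Str.strIsdigit (String.ofList p)
        || (PySem.Str.len (String.ofList p) == 36 && PySem.Str.count (String.ofList p) "-" == 4)
      then "{id}" else String.ofList p) : String).toList = pvRepl p := by
  unfold pvRepl
  split_ifs with ha hb hb
  · decide
  · simp_all [PySem.Chars.len]
  · simp_all [PySem.Chars.len]
  · simp

theorem pvParts_eq (path : String) :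
    (PySem.Str.split? path "/").getD [] = (pvSplit path.toList).map String.ofList := by
  rw [PySem.Str.split?.eq_1, PySem.Chars.split?.eq_1]
  rw [show ("/" : String).toList = ['/'] from rfl]
  simp [pvSplitOn_slash]

-- ===== VERDICT (by name: the statement is the Claim_ definition above) =====
theorem normalise_path_py_spec : Claim_equal_normalise_path_py := by
  intro path _
  unfold Spec_normalise_path_py normalise_path_py normalise_path_py_alt
  rw [← String.toList_inj, String.toList_ofList, PySem.Str.toList_join]
  rw [show ("/" : String).toList = ['/'] from rfl, pvScan_eq_join]
  congr 1
  have hfold : ∀ (l : List String) (acc : List String),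
      l.foldl (fun acc p =>
        if PySem.Str.strIsdigit p || (PySem.Str.len p == 36 && PySem.Str.count p "-" == 4)
        then acc ++ ["{id}"] else acc ++ [p]) acc
      = acc ++ l.map (fun p =>
          if PySem.Str.strIsdigit p || (PySem.Str.len p == 36 && PySem.Str.count p "-" == 4)
          then "{id}" else p) := by
    intro l
    induction l with
    | nil => simp
    | cons p t ih =>
      intro acc
      simp only [List.foldl, List.map]
      split_ifs with h <;> rw [ih] <;> simp
  rw [pvParts_eq, hfold]
  simp only [List.nil_append, List.map_map]
  apply List.map_congr_left
  intro p _
  exact pvSeg_eq p
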